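-- pv_equiv track=rewrite | github.com/MikeMengTR/data-mining | data_preprocessing/reconstruct_measure_gt_to_midi.py | clean_generated_tokens
-- ===== SOURCE A (Python) =====
-- from typing import List, Sequence, Tuple
--
-- def clean_generated_tokens(
--     tokens: List[int],
--     stop_token: int,
--     bos_token_id: int,
--     eos_token_id: int,
--     pad_token_id: int,
-- ) -> List[int]:
--     cleaned: List[int] = []
--     for token in tokens:
--         if token == pad_token_id:
--             break
--         if token == bos_token_id and not cleaned:
--             continue
--         cleaned.append(token)
--         if token == stop_token:
--             break
--     cleaned = [tok for tok in cleaned if tok != eos_token_id]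
--     if stop_token not in cleaned:
--         cleaned.append(stop_token)
--     return cleaned
-- ===== SOURCE B (Python) =====
-- from itertools import dropwhile
-- from typing import List
--
-- def clean_generated_tokens(
--     tokens: List[int],
--     stop_token: int,
--     bos_token_id: int,
--     eos_token_id: int,
--     pad_token_id: int,
-- ) -> List[int]:
--     # Drop leading bos tokens (a leading pad, even if it equals bos, terminates instead).
--     rest = list(dropwhile(lambda t: t == bos_token_id and t != pad_token_id, tokens))
--     # Truncation index: first pad cuts exclusively, first stop cuts inclusively.
--     cut = len(rest)
--     for k, t in enumerate(rest):
--         if t == pad_token_id: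
--             cut = k
--             break
--         if t == stop_token:
--             cut = k + 1
--             break
--     kept = [t for t in rest[:cut] if t != eos_token_id]
--     if stop_token not in kept:
--         kept.append(stop_token)
--     return kept
-- ===== Notes on version B (the rewrite author's own statement) =====
-- stated objective: alternative
-- what changed: Replaces A's single stateful loop (with break/continue and an emptiness test on the accumulator) by a three-stage pipeline: dropwhile-strip the leading bos tokens, compute one truncation index (first pad exclusive / first stop inclusive) and slice, then filter eos and append stop if missing.
import Mathlib
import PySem

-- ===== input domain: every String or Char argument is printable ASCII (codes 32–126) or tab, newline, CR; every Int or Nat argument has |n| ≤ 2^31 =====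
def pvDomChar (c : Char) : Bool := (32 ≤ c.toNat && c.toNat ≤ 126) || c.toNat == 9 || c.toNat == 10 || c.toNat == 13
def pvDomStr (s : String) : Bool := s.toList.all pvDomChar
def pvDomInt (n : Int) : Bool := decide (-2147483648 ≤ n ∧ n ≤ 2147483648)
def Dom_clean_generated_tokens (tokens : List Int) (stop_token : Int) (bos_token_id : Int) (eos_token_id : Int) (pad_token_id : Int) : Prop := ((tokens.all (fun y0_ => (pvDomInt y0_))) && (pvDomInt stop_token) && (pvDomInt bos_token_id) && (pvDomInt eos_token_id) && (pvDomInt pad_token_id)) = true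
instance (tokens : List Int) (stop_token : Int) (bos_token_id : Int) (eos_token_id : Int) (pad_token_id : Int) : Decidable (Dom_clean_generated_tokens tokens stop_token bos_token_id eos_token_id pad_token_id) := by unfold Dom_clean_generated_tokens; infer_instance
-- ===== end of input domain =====

-- B replaces A's stateful break/continue loop by a strip / truncate-index / slice pipeline (alternative decomposition, same cost).


-- ===== PORT A =====
-- A's for-loop with break/continue over the accumulator `cleaned`
def cgtLoopA (tokens : List Int) (stop_token : Int) (bos_token_id : Int) (pad_token_id : Int) (cleaned : List Int) : List Int :=
  match tokens with
  | [] => cleaned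
  | token :: rest =>
    if token = pad_token_id then cleaned
    else if token = bos_token_id ∧ cleaned = [] then
      cgtLoopA rest stop_token bos_token_id pad_token_id cleaned
    else
      let cleaned' := cleaned ++ [token]
      if token = stop_token then cleaned'
      else cgtLoopA rest stop_token bos_token_id pad_token_id cleaned'

def clean_generated_tokens (tokens : List Int) (stop_token : Int) (bos_token_id : Int) (eos_token_id : Int) (pad_token_id : Int) : List Int :=
  let cleaned := cgtLoopA tokens stop_token bos_token_id pad_token_id []
  let cleaned := cleaned.filter (fun tok => decide (tok ≠ eos_token_id))
  if stop_token ∈ cleaned then cleaned else cleaned ++ [stop_token]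

-- ===== PORT B =====
-- B's truncation index on the bos-stripped list: first pad cuts exclusively, first stop inclusively
def cgtCut (rest : List Int) (stop_token : Int) (pad_token_id : Int) : Nat :=
  match rest with
  | [] => 0
  | t :: r =>
    if t = pad_token_id then 0
    else if t = stop_token then 1
    else cgtCut r stop_token pad_token_id + 1

def clean_generated_tokens_alt (tokens : List Int) (stop_token : Int) (bos_token_id : Int) (eos_token_id : Int) (pad_token_id : Int) : List Int :=
  let rest := tokens.dropWhile (fun t => decide (t = bos_token_id ∧ t ≠ pad_token_id))
  let kept := (rest.take (cgtCut rest stop_token pad_token_id)).filter (fun t => decide (t ≠ eos_token_id))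
  if stop_token ∈ kept then kept else kept ++ [stop_token]

-- ===== PRECONDITION & SPEC =====
def Spec_clean_generated_tokens (tokens : List Int) (stop_token : Int) (bos_token_id : Int) (eos_token_id : Int) (pad_token_id : Int) (out : List Int) : Prop := out = clean_generated_tokens_alt tokens stop_token bos_token_id eos_token_id pad_token_id
instance (tokens : List Int) (stop_token : Int) (bos_token_id : Int) (eos_token_id : Int) (pad_token_id : Int) (out : List Int) : Decidable (Spec_clean_generated_tokens tokens stop_token bos_token_id eos_token_id pad_token_id out) := by unfold Spec_clean_generated_tokens; infer_instance

-- ===== CLAIM (what is proved, stated in full; the proofs are below) =====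
def Claim_equal_clean_generated_tokens : Prop := ∀ (tokens : List Int) (stop_token : Int) (bos_token_id : Int) (eos_token_id : Int) (pad_token_id : Int), Dom_clean_generated_tokens tokens stop_token bos_token_id eos_token_id pad_token_id → Spec_clean_generated_tokens tokens stop_token bos_token_id eos_token_id pad_token_id (clean_generated_tokens tokens stop_token bos_token_id eos_token_id pad_token_id)

-- ===== LEMMAS AND PROOFS =====
-- loop with a nonempty accumulator = append the truncated suffix
theorem cgtLoopA_nonempty (rest : List Int) (stop_token bos_token_id pad_token_id : Int)
    (acc : List Int) (h : acc ≠ []) :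
    cgtLoopA rest stop_token bos_token_id pad_token_id acc
      = acc ++ rest.take (cgtCut rest stop_token pad_token_id) := by
  induction rest generalizing acc with
  | nil => simp [cgtLoopA, cgtCut]
  | cons t r ih =>
    by_cases hp : t = pad_token_id
    · subst hp
      simp [cgtLoopA, cgtCut]
    · by_cases hs : t = stop_token
      · subst hs
        simp [cgtLoopA, cgtCut, hp, h]
      · have hrec := ih (acc ++ [t]) (by simp)
        simp [cgtLoopA, cgtCut, hp, hs, h, hrec, List.take_succ_cons]

-- the empty-accumulator loop equals B's strip-then-truncate core
theorem cgtLoopA_eq_core (tokens : List Int) (stop_token bos_token_id pad_token_id : Int) :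
    cgtLoopA tokens stop_token bos_token_id pad_token_id []
      = (tokens.dropWhile (fun t => decide (t = bos_token_id ∧ t ≠ pad_token_id))).take
          (cgtCut (tokens.dropWhile (fun t => decide (t = bos_token_id ∧ t ≠ pad_token_id))) stop_token pad_token_id) := by
  induction tokens with
  | nil => simp [cgtLoopA]
  | cons t r ih =>
    by_cases hp : t = pad_token_id
    · subst hp
      simp [cgtLoopA, cgtCut]
    · by_cases hb : t = bos_token_id
      · subst hb
        simpa [cgtLoopA, List.dropWhile_cons, hp] using ih
      · by_cases hs : t = stop_token
        · subst hs
          simp [cgtLoopA, cgtCut, hp, hb]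
        · have hrec := cgtLoopA_nonempty r stop_token bos_token_id pad_token_id [t] (by simp)
          simp [cgtLoopA, cgtCut, hp, hb, hs, hrec, List.take_succ_cons]

-- ===== VERDICT (by name: the statement is the Claim_ definition above) =====
theorem clean_generated_tokens_spec : Claim_equal_clean_generated_tokens := by
  intro tokens stop_token bos_token_id eos_token_id pad_token_id _
  unfold Spec_clean_generated_tokens clean_generated_tokens clean_generated_tokens_alt
  rw [cgtLoopA_eq_core]
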